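-- pv_equiv track=rewrite | github.com/netor27/codefights-arcade-solutions | python/arcade-theCore/08_MirrorLake/062_ConstructSquare.py | getSquaresWithLength
-- ===== SOURCE A (Python) =====
-- def getSquaresWithLength(length):
--     res = []
--     i = 1
--     s = pow(i, 2)
--     while (len(str(s)) <= length):
--         if len(str(s)) == length:
--             res.append(s)
--         i += 1
--         s = pow(i, 2)
--     return res
-- ===== SOURCE B (Python) =====
-- def getSquaresWithLength(length):
--     # Squares with exactly `length` digits are i*i for isqrt(10**(length-1)-1)+1 <= i <= isqrt(10**length-1).
--     if length < 1:
--         return []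
--     p = 10 ** (length - 1)
--     lo = _isqrt(p - 1) + 1
--     hi = _isqrt(10 * p - 1)
--     return [i * i for i in range(lo, hi + 1)]
--
--
-- def _isqrt(n):
--     # binary search: largest r with r*r <= n  (n >= 0)
--     lo, hi = 0, n + 1
--     while hi - lo > 1:
--         mid = (lo + hi) // 2
--         if mid * mid <= n:
--             lo = mid
--         else:
--             hi = mid
--     return lo
-- ===== Notes on version B (the rewrite author's own statement) =====
-- stated objective: faster
-- what changed: Instead of scanning every candidate base upward and testing the decimal digit count of each square, B computes the exact inclusive range of bases in closed form with a binary-search integer square root and emits the squares directly.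
import Mathlib
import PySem

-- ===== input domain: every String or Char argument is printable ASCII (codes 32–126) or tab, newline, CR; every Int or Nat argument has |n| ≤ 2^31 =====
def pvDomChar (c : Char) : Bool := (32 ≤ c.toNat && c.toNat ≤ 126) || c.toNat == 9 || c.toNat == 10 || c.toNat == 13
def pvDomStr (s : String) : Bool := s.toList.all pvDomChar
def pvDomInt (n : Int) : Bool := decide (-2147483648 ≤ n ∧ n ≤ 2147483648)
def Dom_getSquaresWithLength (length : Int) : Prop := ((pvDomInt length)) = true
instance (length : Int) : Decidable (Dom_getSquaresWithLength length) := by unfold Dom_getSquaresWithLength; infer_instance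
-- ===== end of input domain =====

-- B replaces A's upward scan with digit-count tests by closed-form base bounds obtained
-- from a binary-search integer square root (objective: faster; unverified in a timing run,
-- whose probe found A timing out where B returns).

-- ===== PORT A =====
-- digit-length of the decimal representation (needed by the loop's termination proof, cited by name below)
theorem pvToDigitsCore_length_eq : ∀ (f n : Nat) (ds : List Char), 0 < f → n < 10 ^ f →
    (Nat.toDigitsCore 10 f n ds).length = Nat.log 10 n + 1 + ds.length := by
  intro f
  induction f with
  | zero => intro n ds h; omega
  | succ f ih =>
    intro n ds _ hn
    show (if n / 10 = 0 then _ :: ds else Nat.toDigitsCore 10 f (n / 10) (_ :: ds)).length = _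
    by_cases h10 : n / 10 = 0
    · have hlt : n < 10 := by omega
      simp [h10, Nat.log_eq_zero_iff.mpr (Or.inl hlt)]
      omega
    · have hf : 0 < f := by
        rcases Nat.eq_zero_or_pos f with hf0 | hf0
        · subst hf0; simp at hn; omega
        · exact hf0
      have hdiv : n / 10 < 10 ^ f := by
        have : n < 10 ^ f * 10 := by rw [← pow_succ]; exact hn
        rw [mul_comm] at this
        exact Nat.div_lt_of_lt_mul this
      rw [if_neg h10, ih (n / 10) _ hf hdiv]
      have h10le : 10 ≤ n := by omega
      have := Nat.log_div_base 10 n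
      have := Nat.log_pos (b := 10) (by norm_num) h10le
      simp [List.length]
      omega

theorem pvToDigits_length_eq (n : Nat) : (Nat.toDigits 10 n).length = Nat.log 10 n + 1 := by
  have h : n < 10 ^ (n + 1) := by
    calc n < n + 1 := Nat.lt_succ_self n
    _ ≤ 10 ^ (n + 1) := Nat.le_of_lt (Nat.lt_pow_self (by norm_num))
  simpa using pvToDigitsCore_length_eq (n + 1) n [] (Nat.succ_pos n) h

theorem pvLen_toStr_sq (i : Int) (h : 0 ≤ i) :
    PySem.Str.len (PySem.Int.toStr (i ^ 2)) = ((Nat.log 10 (i.toNat * i.toNat) + 1 : Nat) : Int) := by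
  have hnn : ¬ (i ^ 2 < 0) := by simp [not_lt]; positivity
  have htn : (i ^ 2).toNat = i.toNat * i.toNat := by
    rcases Int.eq_ofNat_of_zero_le h with ⟨m, rfl⟩
    push_cast [pow_two]
    simp [Int.toNat_natCast]
    exact_mod_cast rfl
  rw [PySem.Str.len_eq, PySem.Int.toList_toStr, PySem.Int.toChars, if_neg hnn, htn,
    pvToDigits_length_eq]

-- the loop condition bounds i (cited by the port's decreasing_by)
theorem pvLoopA_dec (length i : Int)
    (h : PySem.Str.len (PySem.Int.toStr (i ^ 2)) ≤ length) :
    ((10:Int) ^ length.toNat - (i + 1)).toNat < ((10:Int) ^ length.toNat - i).toNat := by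
  rcases le_or_gt i 0 with hi | hi
  · -- i ≤ 0 : 10^t ≥ 1 so the measure strictly decreases as long as i < 1 ≤ 10^t
    have hp : (1:Int) ≤ (10:Int) ^ length.toNat := one_le_pow₀ (by norm_num)
    omega
  · have hlen := pvLen_toStr_sq i (le_of_lt hi)
    rw [hlen] at h
    have hL1 : (1:Int) ≤ length := le_trans (by exact_mod_cast Nat.le_add_left 1 _) h
    have hlog : Nat.log 10 (i.toNat * i.toNat) + 1 ≤ length.toNat := by omega
    have hne : i.toNat * i.toNat ≠ 0 := by
      have : 1 ≤ i.toNat := by omega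
      positivity
    have hsq : i.toNat * i.toNat < 10 ^ length.toNat :=
      (Nat.log_lt_iff_lt_pow (by norm_num) hne).mp (by omega)
    have hib : i.toNat < 10 ^ length.toNat := by
      calc i.toNat ≤ i.toNat * i.toNat := Nat.le_mul_of_pos_right _ (by omega)
      _ < 10 ^ length.toNat := hsq
    have : (i : Int) < (10:Int) ^ length.toNat := by
      have : ((i.toNat : Int)) < (((10:Nat) ^ length.toNat : Nat) : Int) := by exact_mod_cast hib
      simpa [Int.toNat_of_nonneg (le_of_lt hi)] using this
    omega

def getSquaresWithLengthLoop (length i : Int) (res : List Int) : List Int :=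
  let s := i ^ 2
  if h : PySem.Str.len (PySem.Int.toStr s) ≤ length then
    getSquaresWithLengthLoop length (i + 1)
      (if PySem.Str.len (PySem.Int.toStr s) = length then res ++ [s] else res)
  else res
termination_by ((10:Int) ^ length.toNat - i).toNat
decreasing_by exact pvLoopA_dec length i h

def getSquaresWithLength (length : Int) : List Int :=
  getSquaresWithLengthLoop length 1 []

-- ===== PORT B =====
def isqrtGo (n lo hi : Nat) : Nat :=
  if hi - lo > 1 then
    let mid := (lo + hi) / 2
    if mid * mid ≤ n then isqrtGo n mid hi else isqrtGo n lo mid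
  else lo
termination_by hi - lo
decreasing_by all_goals omega

def isqrtB (n : Nat) : Nat := isqrtGo n 0 (n + 1)

def getSquaresWithLength_alt (length : Int) : List Int :=
  if length < 1 then []
  else
    let p := (10:Nat) ^ (length - 1).toNat
    let lo := isqrtB (p - 1) + 1
    let hi := isqrtB (10 * p - 1)
    (List.range' lo (hi + 1 - lo)).map (fun i => ((i * i : Nat) : Int))

-- ===== PRECONDITION & SPEC =====
def Spec_getSquaresWithLength (length : Int) (out : List Int) : Prop := out = getSquaresWithLength_alt length
instance (length : Int) (out : List Int) : Decidable (Spec_getSquaresWithLength length out) := by unfold Spec_getSquaresWithLength; infer_instance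

-- ===== CLAIM (what is proved, stated in full; the proofs are below) =====
def Claim_equal_getSquaresWithLength : Prop := ∀ (length : Int), Dom_getSquaresWithLength length → Spec_getSquaresWithLength length (getSquaresWithLength length)

-- ===== LEMMAS AND PROOFS =====
theorem isqrtGo_eq_sqrt (n : Nat) : ∀ (lo hi : Nat), lo * lo ≤ n → n < hi * hi →
    isqrtGo n lo hi = Nat.sqrt n := by
  intro lo hi
  fun_induction isqrtGo n lo hi with
  | case1 lo hi hgap mid hmid ih =>
    intro _ h2
    exact ih hmid h2
  | case2 lo hi hgap mid hmid ih =>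
    intro h1 _
    exact ih h1 (by omega)
  | case3 lo hi hgap =>
    intro h1 h2
    have hlt : lo < hi := by
      by_contra hc
      have : hi * hi ≤ lo * lo := Nat.mul_le_mul (by omega) (by omega)
      omega
    have hhi : hi = lo + 1 := by omega
    subst hhi
    have ha := Nat.sqrt_lt.mpr h2
    have hb := Nat.le_sqrt.mpr h1
    omega

theorem isqrtB_eq_sqrt (n : Nat) : isqrtB n = Nat.sqrt n := by
  refine isqrtGo_eq_sqrt n 0 (n + 1) (by omega) ?_
  nlinarith

theorem pvCond_iff (length i : Int) (h1 : 1 ≤ length) (hi : 1 ≤ i) :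
    (PySem.Str.len (PySem.Int.toStr (i ^ 2)) ≤ length ↔
      i.toNat ≤ Nat.sqrt (10 ^ length.toNat - 1)) ∧
    (PySem.Str.len (PySem.Int.toStr (i ^ 2)) = length ↔
      (Nat.sqrt (10 ^ (length.toNat - 1) - 1) + 1 ≤ i.toNat ∧
       i.toNat ≤ Nat.sqrt (10 ^ length.toNat - 1))) := by
  have hlen := pvLen_toStr_sq i (by omega)
  have hLcast : length = (length.toNat : Int) := (Int.toNat_of_nonneg (by omega)).symm
  set m := i.toNat * i.toNat with hm
  set L := length.toNat with hL
  have hL1 : 1 ≤ L := by omega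
  have hmne : m ≠ 0 := by
    have : 1 ≤ i.toNat := by omega
    positivity
  have hpowL : 1 ≤ 10 ^ L := Nat.one_le_pow _ _ (by norm_num)
  have hpowL1 : 1 ≤ 10 ^ (L - 1) := Nat.one_le_pow _ _ (by norm_num)
  have hle : PySem.Str.len (PySem.Int.toStr (i ^ 2)) ≤ length ↔ Nat.log 10 m + 1 ≤ L := by
    rw [hlen, hLcast]; exact_mod_cast Iff.rfl
  have heq : PySem.Str.len (PySem.Int.toStr (i ^ 2)) = length ↔ Nat.log 10 m + 1 = L := by
    rw [hlen, hLcast]; exact_mod_cast Iff.rfl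
  have hub : Nat.log 10 m + 1 ≤ L ↔ i.toNat ≤ Nat.sqrt (10 ^ L - 1) := by
    rw [Nat.le_sqrt]
    have h1' : Nat.log 10 m < L ↔ m < 10 ^ L := Nat.log_lt_iff_lt_pow (by norm_num) hmne
    omega
  have hlb : L ≤ Nat.log 10 m + 1 ↔ Nat.sqrt (10 ^ (L - 1) - 1) + 1 ≤ i.toNat := by
    rw [Nat.succ_le_iff, Nat.sqrt_lt]
    have h2' : L - 1 ≤ Nat.log 10 m ↔ 10 ^ (L - 1) ≤ m := Nat.le_log_iff_pow_le (by norm_num) hmne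
    omega
  refine ⟨hle.trans hub, heq.trans ?_⟩
  constructor
  · intro h; exact ⟨hlb.mp (by omega), hub.mp (by omega)⟩
  · rintro ⟨ha, hb⟩
    have := hlb.mpr ha
    have := hub.mpr hb
    omega

theorem pvLoop_eq (length : Int) (h1 : 1 ≤ length) :
    ∀ (fuel : Nat) (i : Int) (res : List Int), 1 ≤ i →
      Nat.sqrt (10 ^ length.toNat - 1) + 1 - i.toNat ≤ fuel →
      getSquaresWithLengthLoop length i res
        = res ++ (List.range' i.toNat (Nat.sqrt (10 ^ length.toNat - 1) + 1 - i.toNat)).filterMap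
            (fun j => if Nat.sqrt (10 ^ (length.toNat - 1) - 1) + 1 ≤ j
                      then some ((j * j : Nat) : Int) else none) := by
  intro fuel
  induction fuel with
  | zero =>
    intro i res hi hfuel
    have hcond := (pvCond_iff length i h1 hi).1
    rw [getSquaresWithLengthLoop, dif_neg (fun hc => absurd (hcond.mp hc) (by omega))]
    have hz : Nat.sqrt (10 ^ length.toNat - 1) + 1 - i.toNat = 0 := by omega
    simp [hz]
  | succ fuel ih =>
    intro i res hi hfuel
    have hcond := pvCond_iff length i h1 hi
    by_cases hle : i.toNat ≤ Nat.sqrt (10 ^ length.toNat - 1)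
    · rw [getSquaresWithLengthLoop]
      rw [dif_pos (hcond.1.mpr hle)]
      have hi1 : (i + 1).toNat = i.toNat + 1 := by omega
      rw [ih (i + 1) _ (by omega) (by omega)]
      have hcount : Nat.sqrt (10 ^ length.toNat - 1) + 1 - i.toNat
          = (Nat.sqrt (10 ^ length.toNat - 1) + 1 - (i.toNat + 1)) + 1 := by omega
      rw [hcount, List.range'_succ, List.filterMap_cons, hi1]
      have hsq : (i ^ 2 : Int) = ((i.toNat * i.toNat : Nat) : Int) := by
        rcases Int.eq_ofNat_of_zero_le (a := i) (by omega) with ⟨m, rfl⟩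
        push_cast [pow_two]
        simp
      by_cases happ : Nat.sqrt (10 ^ (length.toNat - 1) - 1) + 1 ≤ i.toNat
      · rw [if_pos (hcond.2.mpr ⟨happ, hle⟩), if_pos happ, hsq]
        simp
      · rw [if_neg (fun hc => absurd ((hcond.2.mp hc).1) happ), if_neg happ]
    · have hcnd := (pvCond_iff length i h1 hi).1
      rw [getSquaresWithLengthLoop, dif_neg (fun hc => absurd (hcnd.mp hc) hle)]
      have hz : Nat.sqrt (10 ^ length.toNat - 1) + 1 - i.toNat = 0 := by omega
      simp [hz]

-- ===== VERDICT (by name: the statement is the Claim_ definition above) =====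
theorem getSquaresWithLength_spec : Claim_equal_getSquaresWithLength := by
  intro length _
  unfold Spec_getSquaresWithLength
  by_cases hL : length < 1
  · have h1 : PySem.Str.len (PySem.Int.toStr ((1:Int) ^ 2)) = 1 := by decide
    rw [getSquaresWithLength, getSquaresWithLengthLoop, dif_neg (by rw [h1]; omega),
      getSquaresWithLength_alt, if_pos hL]
  · have h1 : 1 ≤ length := by omega
    set L := length.toNat with hLdef
    have hL1 : 1 ≤ L := by omega
    have hLm1 : (length - 1).toNat = L - 1 := by omega
    have hpow : 10 * 10 ^ (L - 1) = 10 ^ L := by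
      conv_rhs => rw [show L = (L - 1) + 1 by omega]
      rw [pow_succ]; ring
    set HI := Nat.sqrt (10 ^ L - 1) with hHI
    set LO := Nat.sqrt (10 ^ (L - 1) - 1) + 1 with hLO
    have hLOHI : LO ≤ HI + 1 := by
      have hm : 10 ^ (L - 1) ≤ 10 ^ L := Nat.pow_le_pow_right (by norm_num) (by omega)
      have := Nat.sqrt_le_sqrt (m := 10 ^ (L - 1) - 1) (n := 10 ^ L - 1) (by omega)
      omega
    have hone : (1 : Int).toNat = 1 := rfl
    rw [getSquaresWithLength,
      pvLoop_eq length h1 (HI + 1) 1 [] (by norm_num) (by rw [hone, ← hLdef, ← hHI]; omega)]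
    rw [getSquaresWithLength_alt, if_neg (by omega)]
    simp only [hLm1, isqrtB_eq_sqrt, hpow, hone, ← hLdef, ← hHI, ← hLO, List.nil_append]
    have hsplit : List.range' 1 HI = List.range' 1 (LO - 1) ++ List.range' LO (HI + 1 - LO) := by
      have hap := List.range'_append (s := 1) (m := LO - 1) (n := HI + 1 - LO) (step := 1)
      rw [show 1 + 1 * (LO - 1) = LO by omega, show (LO - 1) + (HI + 1 - LO) = HI by omega] at hap
      exact hap.symm
    rw [show HI + 1 - 1 = HI by omega, hsplit, List.filterMap_append]
    have hnil : (List.range' 1 (LO - 1)).filterMap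
        (fun j => if LO ≤ j then some ((j * j : Nat) : Int) else none) = [] := by
      refine List.filterMap_eq_nil_iff.mpr (fun j hj => ?_)
      have := List.mem_range'_1.mp hj
      rw [if_neg (by omega)]
    have hmap : (List.range' LO (HI + 1 - LO)).filterMap
        (fun j => if LO ≤ j then some ((j * j : Nat) : Int) else none)
        = (List.range' LO (HI + 1 - LO)).map (fun j => ((j * j : Nat) : Int)) := by
      rw [List.filterMap_congr (g := some ∘ (fun j => ((j * j : Nat) : Int)))
        (fun j hj => by
          have := List.mem_range'_1.mp hj
          simp only [Function.comp]
          rw [if_pos (by omega)]),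
        List.filterMap_eq_map]
    rw [hnil, hmap, List.nil_append]
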